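-- pv_equiv track=rewrite | github.com/wangchr1617/TDEkit | tdekit/tde.py | generate_crystal_directions
-- ===== SOURCE A (Python) =====
-- from itertools import combinations_with_replacement, product
-- from math import gcd
--
-- def generate_crystal_directions(hmax):
--     directions_set = set()
--     indices = list(range(-hmax, hmax+1))
--     for h, k, l in product(indices, indices, indices):
--         if h == 0 and k == 0 and l == 0:
--             continue
--         g = gcd(gcd(abs(h), abs(k)), abs(l))
--         if g == 0:
--             continue
--         h_norm = h // g
--         k_norm = k // g
--         l_norm = l // g
--         if l_norm < 0:
--             h_norm, k_norm, l_norm = -h_norm, -k_norm, -l_norm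
--         elif l_norm == 0 and k_norm < 0:
--             h_norm, k_norm, l_norm = -h_norm, -k_norm, -l_norm
--         elif l_norm == 0 and k_norm == 0 and h_norm < 0:
--             h_norm, k_norm, l_norm = -h_norm, -k_norm, -l_norm
--         directions_set.add((h_norm, k_norm, l_norm))
--     return sorted(directions_set)
-- ===== SOURCE B (Python) =====
-- from math import gcd
--
-- def generate_crystal_directions(hmax):
--     # Filter pass: each canonical primitive direction appears exactly once in the
--     # cube scan, and the scan order is already lexicographic, so no dedup/sort.
--     out = []
--     for h in range(-hmax, hmax + 1):
--         for k in range(-hmax, hmax + 1):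
--             for l in range(-hmax, hmax + 1):
--                 if (h, k, l) != (0, 0, 0) \
--                         and gcd(gcd(abs(h), abs(k)), abs(l)) == 1 \
--                         and (l > 0 or (l == 0 and k > 0) or (l == 0 and k == 0 and h > 0)):
--                     out.append((h, k, l))
--     return out
-- ===== Notes on version B (the rewrite author's own statement) =====
-- stated objective: simpler
-- what changed: A normalizes every cube triple (gcd division + sign folding), deduplicates through a set and sorts it; B keeps a triple directly iff it is already primitive (gcd 1) and canonically oriented, so each direction is emitted exactly once and the scan order is already sorted - no division, no set, no sort.
import Mathlib
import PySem

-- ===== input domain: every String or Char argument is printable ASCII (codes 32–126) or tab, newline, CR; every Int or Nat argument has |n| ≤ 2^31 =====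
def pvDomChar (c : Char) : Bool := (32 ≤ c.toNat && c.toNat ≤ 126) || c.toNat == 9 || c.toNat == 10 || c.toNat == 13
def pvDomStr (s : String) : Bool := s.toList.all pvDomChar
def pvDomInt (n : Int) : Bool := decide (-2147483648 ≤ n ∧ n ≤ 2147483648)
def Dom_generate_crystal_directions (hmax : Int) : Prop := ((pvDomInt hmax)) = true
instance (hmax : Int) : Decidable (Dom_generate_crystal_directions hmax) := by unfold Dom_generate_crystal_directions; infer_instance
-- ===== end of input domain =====

-- B replaces A's normalize-fold-dedup-sort strategy by a single filter pass (keep a triple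
-- iff it is already primitive and canonically oriented; the scan order is already sorted);
-- objective: simpler.

-- ===== PORT A =====

-- Python's tuple `<` is LEXICOGRAPHIC; Mathlib's `<` on Int × Int × Int is the pointwise
-- order, so sorted(...) below is ported with an explicit lex comparator (exact for tuples
-- of ints) in the insertion-sort shape of PySem.List.sorted (cf. sorted_eq_foldl_insertBy).
def pvLexLt (a b : Int × Int × Int) : Bool :=
  decide (a.1 < b.1) ||
    (decide (a.1 = b.1) && (decide (a.2.1 < b.2.1) ||
      (decide (a.2.1 = b.2.1) && decide (a.2.2 < b.2.2))))

-- g = gcd(gcd(abs(h), abs(k)), abs(l))  (math.gcd on ints = Nat.gcd of the absolute values)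
def pvGcd3 (h k l : Int) : Nat := Nat.gcd (Nat.gcd h.natAbs k.natAbs) l.natAbs

-- the normalisation of the loop body: divide by g, then the three sign-folding branches
def pvNormVal (t : Int × Int × Int) : Int × Int × Int :=
  let g : Int := (pvGcd3 t.1 t.2.1 t.2.2 : Nat)
  let hn := PySem.Int.floordiv t.1 g
  let kn := PySem.Int.floordiv t.2.1 g
  let ln := PySem.Int.floordiv t.2.2 g
  if ln < 0 then (-hn, -kn, -ln)
  else if ln = 0 ∧ kn < 0 then (-hn, -kn, -ln)
  else if ln = 0 ∧ kn = 0 ∧ hn < 0 then (-hn, -kn, -ln)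
  else (hn, kn, ln)

-- one iteration of A's loop: the two 'continue's, then directions_set.add(...)
def pvStepA (s : PySem.Set (Int × Int × Int)) (t : Int × Int × Int) :
    PySem.Set (Int × Int × Int) :=
  if t.1 = 0 ∧ t.2.1 = 0 ∧ t.2.2 = 0 then s
  else if ((pvGcd3 t.1 t.2.1 t.2.2 : Nat) : Int) = 0 then s
  else PySem.Set.add s (pvNormVal t)

def generate_crystal_directions (hmax : Int) : List (Int × Int × Int) :=
  let indices := PySem.List.pyRange (-hmax) (hmax + 1) 1
  let dset :=
    (indices.flatMap fun h => indices.flatMap fun k => indices.map fun l => (h, k, l)).foldl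
      pvStepA PySem.Set.empty
  dset.foldl (fun acc x => PySem.List.insertBy pvLexLt x acc) []

-- ===== PORT B =====

def pvKeep (h k l : Int) : Bool :=
  !(decide (h = 0) && decide (k = 0) && decide (l = 0)) &&
    (Nat.gcd (Nat.gcd h.natAbs k.natAbs) l.natAbs == 1) &&
    (decide (0 < l) || (decide (l = 0) && decide (0 < k)) ||
      (decide (l = 0) && decide (k = 0) && decide (0 < h)))

def generate_crystal_directions_alt (hmax : Int) : List (Int × Int × Int) :=
  (PySem.List.pyRange (-hmax) (hmax + 1) 1).flatMap fun h =>
    (PySem.List.pyRange (-hmax) (hmax + 1) 1).flatMap fun k =>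
      ((PySem.List.pyRange (-hmax) (hmax + 1) 1).filter fun l => pvKeep h k l).map
        fun l => (h, k, l)

-- ===== PRECONDITION & SPEC =====
-- (A is total: no Pre_.)
def Spec_generate_crystal_directions (hmax : Int) (out : List (Int × Int × Int)) : Prop := out = generate_crystal_directions_alt hmax
instance (hmax : Int) (out : List (Int × Int × Int)) : Decidable (Spec_generate_crystal_directions hmax out) := by unfold Spec_generate_crystal_directions; infer_instance

-- ===== CLAIM (what is proved, stated in full; the proofs are below) =====
def Claim_equal_generate_crystal_directions : Prop := ∀ (hmax : Int), Dom_generate_crystal_directions hmax → Spec_generate_crystal_directions hmax (generate_crystal_directions hmax)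

-- ===== LEMMAS AND PROOFS =====

-- facts about the lex comparator
theorem pvLex_irrefl (a : Int × Int × Int) : pvLexLt a a = false := by
  simp [pvLexLt]

theorem pvLex_trans_lt (a b c : Int × Int × Int) :
    pvLexLt a b = true → pvLexLt b c = true → pvLexLt a c = true := by
  obtain ⟨a1, a2, a3⟩ := a; obtain ⟨b1, b2, b3⟩ := b; obtain ⟨c1, c2, c3⟩ := c
  simp [pvLexLt]; omega

theorem pvLex_asymm (a b : Int × Int × Int) :
    pvLexLt a b = true → pvLexLt b a = false := by
  obtain ⟨a1, a2, a3⟩ := a; obtain ⟨b1, b2, b3⟩ := b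
  simp [pvLexLt]; omega

theorem pvLex_le_antisymm (a b : Int × Int × Int) :
    pvLexLt b a = false → pvLexLt a b = false → a = b := by
  obtain ⟨a1, a2, a3⟩ := a; obtain ⟨b1, b2, b3⟩ := b
  simp [pvLexLt]; omega

theorem pvLex_ne (a b : Int × Int × Int) : pvLexLt a b = true → a ≠ b := by
  intro h he; subst he; simp [pvLex_irrefl] at h

-- insertion sort: the accumulator stays sorted (≤ = "not >")
theorem pvInsert_pairwise (x : Int × Int × Int) (ys : List (Int × Int × Int))
    (hys : ys.Pairwise (fun a b => pvLexLt b a = false)) :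
    (PySem.List.insertBy pvLexLt x ys).Pairwise (fun a b => pvLexLt b a = false) := by
  induction ys with
  | nil => simp [PySem.List.insertBy]
  | cons y ys ih =>
    rw [List.pairwise_cons] at hys
    by_cases hxy : pvLexLt x y = true
    · simp only [PySem.List.insertBy, hxy, if_pos]
      refine List.Pairwise.cons ?_ (List.Pairwise.cons hys.1 hys.2)
      intro z hz
      rcases List.mem_cons.mp hz with hz | hz
      · subst hz; exact pvLex_asymm _ _ hxy
      · by_cases hzx : pvLexLt z x = true
        · have := pvLex_trans_lt _ _ _ hzx hxy
          rw [hys.1 z hz] at this; exact absurd this (by simp)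
        · simpa using hzx
    · simp only [PySem.List.insertBy, hxy, if_neg, Bool.not_eq_true]
      refine List.Pairwise.cons ?_ (ih hys.2)
      intro z hz
      rcases (PySem.List.mem_insertBy pvLexLt x z ys).mp hz with hz | hz
      · subst hz; simpa using hxy
      · exact hys.1 z hz

theorem pvFoldSort_pairwise (s acc : List (Int × Int × Int))
    (hacc : acc.Pairwise (fun a b => pvLexLt b a = false)) :
    (s.foldl (fun acc x => PySem.List.insertBy pvLexLt x acc) acc).Pairwise
      (fun a b => pvLexLt b a = false) := by
  induction s generalizing acc with
  | nil => simpa using hacc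
  | cons t s ih => exact ih _ (pvInsert_pairwise t acc hacc)

theorem pvFoldSort_perm (s acc : List (Int × Int × Int)) :
    (s.foldl (fun acc x => PySem.List.insertBy pvLexLt x acc) acc).Perm (acc ++ s) := by
  induction s generalizing acc with
  | nil => simp
  | cons t s ih =>
    have h1 := ih (PySem.List.insertBy pvLexLt t acc)
    have h2 := (PySem.List.insertBy_perm pvLexLt t acc).append_right s
    have h3 : (t :: acc ++ s).Perm (acc ++ t :: s) := by
      simpa using (List.perm_middle (a := t) (l₁ := acc) (l₂ := s)).symm
    exact h1.trans (h2.trans h3)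

-- g = 0 exactly on the all-zero triple
theorem pvGcd3_eq_zero (h k l : Int) : pvGcd3 h k l = 0 ↔ h = 0 ∧ k = 0 ∧ l = 0 := by
  simp [pvGcd3, Nat.gcd_eq_zero_iff, Int.natAbs_eq_zero, and_assoc]

-- membership in A's directions_set
theorem pvMem_stepA (s : PySem.Set (Int × Int × Int)) (t x : Int × Int × Int) :
    x ∈ pvStepA s t ↔ x ∈ s ∨ (¬(t.1 = 0 ∧ t.2.1 = 0 ∧ t.2.2 = 0) ∧ pvNormVal t = x) := by
  unfold pvStepA
  by_cases h0 : t.1 = 0 ∧ t.2.1 = 0 ∧ t.2.2 = 0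
  · simp [h0]
  · have hg : ¬ pvGcd3 t.1 t.2.1 t.2.2 = 0 := by
      simpa [pvGcd3_eq_zero] using h0
    simp [h0, hg, PySem.Set.mem_add, eq_comm]

theorem pvMem_foldA (l : List (Int × Int × Int)) (s : PySem.Set (Int × Int × Int))
    (x : Int × Int × Int) :
    x ∈ l.foldl pvStepA s ↔
      x ∈ s ∨ ∃ t ∈ l, ¬(t.1 = 0 ∧ t.2.1 = 0 ∧ t.2.2 = 0) ∧ pvNormVal t = x := by
  induction l generalizing s with
  | nil => simp
  | cons t l ih =>
    simp only [List.foldl_cons, ih, pvMem_stepA, List.mem_cons]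
    constructor
    · rintro ((h | h) | ⟨u, hu, h⟩)
      · exact Or.inl h
      · exact Or.inr ⟨t, Or.inl rfl, h⟩
      · exact Or.inr ⟨u, Or.inr hu, h⟩
    · rintro (h | ⟨u, (rfl | hu), h⟩)
      · exact Or.inl (Or.inl h)
      · exact Or.inl (Or.inr h)
      · exact Or.inr ⟨u, hu, h⟩

theorem pvNodup_foldA (l : List (Int × Int × Int)) (s : PySem.Set (Int × Int × Int))
    (hs : s.Nodup) : (l.foldl pvStepA s).Nodup := by
  induction l generalizing s with
  | nil => exact hs
  | cons t l ih =>
    refine ih _ ?_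
    unfold pvStepA
    split_ifs with h1 h2
    · exact hs
    · exact hs
    · exact PySem.Set.nodup_add _ _ hs

-- the cube scan list of A
theorem pvMem_cube (hmax : Int) (x : Int × Int × Int) :
    (x ∈ (PySem.List.pyRange (-hmax) (hmax + 1) 1).flatMap fun h =>
        (PySem.List.pyRange (-hmax) (hmax + 1) 1).flatMap fun k =>
          (PySem.List.pyRange (-hmax) (hmax + 1) 1).map fun l => (h, k, l)) ↔
      (-hmax ≤ x.1 ∧ x.1 < hmax + 1) ∧ (-hmax ≤ x.2.1 ∧ x.2.1 < hmax + 1) ∧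
        (-hmax ≤ x.2.2 ∧ x.2.2 < hmax + 1) := by
  obtain ⟨h, k, l⟩ := x
  simp [List.mem_flatMap, PySem.List.mem_pyRange_one]

theorem pvFloordiv_one (x : Int) : PySem.Int.floordiv x 1 = x := by
  rw [PySem.Int.floordiv_eq_ediv_of_pos (by norm_num)]; exact Int.ediv_one x

-- normalisation: the result passes B's filter and stays in the cube
theorem pvNormVal_keep (t : Int × Int × Int) (hmax : Int)
    (hcube : (-hmax ≤ t.1 ∧ t.1 < hmax + 1) ∧ (-hmax ≤ t.2.1 ∧ t.2.1 < hmax + 1) ∧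
      (-hmax ≤ t.2.2 ∧ t.2.2 < hmax + 1))
    (h0 : ¬(t.1 = 0 ∧ t.2.1 = 0 ∧ t.2.2 = 0)) :
    pvKeep (pvNormVal t).1 (pvNormVal t).2.1 (pvNormVal t).2.2 = true ∧
      (-hmax ≤ (pvNormVal t).1 ∧ (pvNormVal t).1 < hmax + 1) ∧
      (-hmax ≤ (pvNormVal t).2.1 ∧ (pvNormVal t).2.1 < hmax + 1) ∧
      (-hmax ≤ (pvNormVal t).2.2 ∧ (pvNormVal t).2.2 < hmax + 1) := by
  obtain ⟨h, k, l⟩ := t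
  simp only at hcube h0 ⊢
  have hg0 : pvGcd3 h k l ≠ 0 := by
    simp only [pvGcd3, Ne, Nat.gcd_eq_zero_iff, Int.natAbs_eq_zero]
    intro hz; exact h0 ⟨hz.1.1, hz.1.2, hz.2⟩
  set g : Nat := pvGcd3 h k l with hgdef
  have gpos : (0 : Int) < (g : Int) := by exact_mod_cast Nat.pos_of_ne_zero hg0
  have hdh : (g : Int) ∣ h :=
    Int.dvd_natAbs.mp (Int.natCast_dvd_natCast.mpr
      ((Nat.gcd_dvd_left _ _).trans (Nat.gcd_dvd_left _ _)))
  have hdk : (g : Int) ∣ k :=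
    Int.dvd_natAbs.mp (Int.natCast_dvd_natCast.mpr
      ((Nat.gcd_dvd_left _ _).trans (Nat.gcd_dvd_right _ _)))
  have hdl : (g : Int) ∣ l :=
    Int.dvd_natAbs.mp (Int.natCast_dvd_natCast.mpr (Nat.gcd_dvd_right _ _))
  obtain ⟨a, ha⟩ := hdh
  obtain ⟨b, hb⟩ := hdk
  obtain ⟨c, hc⟩ := hdl
  have hfa : PySem.Int.floordiv h (g : Int) = a := by
    rw [PySem.Int.floordiv_eq_ediv_of_pos gpos, ha, Int.mul_ediv_cancel_left _ (ne_of_gt gpos)]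
  have hfb : PySem.Int.floordiv k (g : Int) = b := by
    rw [PySem.Int.floordiv_eq_ediv_of_pos gpos, hb, Int.mul_ediv_cancel_left _ (ne_of_gt gpos)]
  have hfc : PySem.Int.floordiv l (g : Int) = c := by
    rw [PySem.Int.floordiv_eq_ediv_of_pos gpos, hc, Int.mul_ediv_cancel_left _ (ne_of_gt gpos)]
  -- the normalised triple is primitive
  have hgabc : Nat.gcd (Nat.gcd a.natAbs b.natAbs) c.natAbs = 1 := by
    have hexp : g = g * Nat.gcd (Nat.gcd a.natAbs b.natAbs) c.natAbs := by
      conv_lhs => rw [hgdef]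
      rw [pvGcd3, ha, hb, hc]
      simp [Int.natAbs_mul, Nat.gcd_mul_left]
    have := hexp.symm
    nth_rewrite 2 [← Nat.mul_one g] at this
    exact Nat.eq_of_mul_eq_mul_left (Nat.pos_of_ne_zero hg0) this
  -- bounds survive the division (|a| ≤ |h| since h = g·a, 1 ≤ g)
  have hba : a.natAbs ≤ h.natAbs := by
    rw [ha, Int.natAbs_mul, Int.natAbs_natCast]
    exact Nat.le_mul_of_pos_left _ (Nat.pos_of_ne_zero hg0)
  have hbb : b.natAbs ≤ k.natAbs := by
    rw [hb, Int.natAbs_mul, Int.natAbs_natCast]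
    exact Nat.le_mul_of_pos_left _ (Nat.pos_of_ne_zero hg0)
  have hbc : c.natAbs ≤ l.natAbs := by
    rw [hc, Int.natAbs_mul, Int.natAbs_natCast]
    exact Nat.le_mul_of_pos_left _ (Nat.pos_of_ne_zero hg0)
  have hnz : ¬(a = 0 ∧ b = 0 ∧ c = 0) := by
    rintro ⟨rfl, rfl, rfl⟩
    simp only [mul_zero] at ha hb hc
    exact h0 ⟨ha, hb, hc⟩
  have hbndA : -hmax ≤ a ∧ a < hmax + 1 := by have := hba; omega
  have hbndB : -hmax ≤ b ∧ b < hmax + 1 := by have := hbb; omega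
  have hbndC : -hmax ≤ c ∧ c < hmax + 1 := by have := hbc; omega
  unfold pvNormVal
  rw [← hgdef]
  simp only [hfa, hfb, hfc]
  split_ifs with h1 h2 h3 <;>
    refine ⟨by simp only [pvKeep, Int.natAbs_neg, hgabc]; simp; omega,
      by simp; omega, by simp; omega, by simp; omega⟩

-- B's filter members are fixed points of the normalisation
theorem pvNormVal_fixed (h k l : Int) (hk : pvKeep h k l = true) :
    pvNormVal (h, k, l) = (h, k, l) := by
  simp only [pvKeep, Bool.and_eq_true, Bool.or_eq_true, beq_iff_eq,
    decide_eq_true_eq, Bool.not_eq_true', Bool.and_eq_false_iff,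
    decide_eq_false_iff_not] at hk
  obtain ⟨⟨-, hg⟩, hcan⟩ := hk
  unfold pvNormVal pvGcd3
  simp only [hg, Nat.cast_one, pvFloordiv_one]
  split_ifs with h1 h2 h3 <;> first | rfl | (exfalso; omega)

-- membership in B's output
theorem pvMem_alt (hmax : Int) (x : Int × Int × Int) :
    x ∈ generate_crystal_directions_alt hmax ↔
      (-hmax ≤ x.1 ∧ x.1 < hmax + 1) ∧ (-hmax ≤ x.2.1 ∧ x.2.1 < hmax + 1) ∧
        (-hmax ≤ x.2.2 ∧ x.2.2 < hmax + 1) ∧ pvKeep x.1 x.2.1 x.2.2 = true := by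
  obtain ⟨h, k, l⟩ := x
  simp [generate_crystal_directions_alt, List.mem_flatMap, List.mem_filter,
    PySem.List.mem_pyRange_one]

-- B's output is strictly lex-increasing
theorem pvAlt_pairwise (hmax : Int) :
    (generate_crystal_directions_alt hmax).Pairwise (fun a b => pvLexLt a b = true) := by
  unfold generate_crystal_directions_alt
  rw [List.pairwise_flatMap]
  constructor
  · intro h _
    rw [List.pairwise_flatMap]
    constructor
    · intro k _
      refine List.Pairwise.map _ (fun l1 l2 hlt => ?_)
        (List.Pairwise.sublist List.filter_sublist (PySem.List.pairwise_lt_pyRange_one _ _))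
      simp [pvLexLt]; omega
    · refine (PySem.List.pairwise_lt_pyRange_one _ _).imp ?_
      intro k1 k2 hk x hx y hy
      simp only [List.mem_map] at hx hy
      obtain ⟨l1, -, rfl⟩ := hx
      obtain ⟨l2, -, rfl⟩ := hy
      simp [pvLexLt]; omega
  · refine (PySem.List.pairwise_lt_pyRange_one _ _).imp ?_
    intro h1 h2 hh x hx y hy
    simp only [List.mem_flatMap, List.mem_map] at hx hy
    obtain ⟨k1, -, l1, -, rfl⟩ := hx
    obtain ⟨k2, -, l2, -, rfl⟩ := hy
    simp [pvLexLt]; omega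

-- ===== VERDICT (by name: the statement is the Claim_ definition above) =====
theorem generate_crystal_directions_spec : Claim_equal_generate_crystal_directions := by
  intro hmax _
  unfold Spec_generate_crystal_directions generate_crystal_directions
  show ((((PySem.List.pyRange (-hmax) (hmax + 1) 1).flatMap fun h =>
      (PySem.List.pyRange (-hmax) (hmax + 1) 1).flatMap fun k =>
        (PySem.List.pyRange (-hmax) (hmax + 1) 1).map fun l => (h, k, l)).foldl
      pvStepA PySem.Set.empty).foldl (fun acc x => PySem.List.insertBy pvLexLt x acc) []) =
    generate_crystal_directions_alt hmax
  set S := ((PySem.List.pyRange (-hmax) (hmax + 1) 1).flatMap fun h =>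
      (PySem.List.pyRange (-hmax) (hmax + 1) 1).flatMap fun k =>
        (PySem.List.pyRange (-hmax) (hmax + 1) 1).map fun l => (h, k, l)).foldl
    pvStepA PySem.Set.empty with hSdef
  have hSnodup : S.Nodup := pvNodup_foldA _ _ List.nodup_nil
  have hAltNodup : (generate_crystal_directions_alt hmax).Nodup :=
    (pvAlt_pairwise hmax).imp (fun hab => pvLex_ne _ _ hab)
  have hmem : ∀ x, x ∈ S ↔ x ∈ generate_crystal_directions_alt hmax := by
    intro x
    rw [hSdef, pvMem_foldA, pvMem_alt]
    constructor
    · rintro (hx | ⟨t, htmem, ht0, rfl⟩)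
      · simp [PySem.Set.empty] at hx
      · have hc := (pvMem_cube hmax t).mp htmem
        have hkp := pvNormVal_keep t hmax hc ht0
        exact ⟨hkp.2.1, hkp.2.2.1, hkp.2.2.2, hkp.1⟩
    · rintro ⟨hb1, hb2, hb3, hk⟩
      refine Or.inr ⟨x, (pvMem_cube hmax x).mpr ⟨hb1, hb2, hb3⟩, ?_, ?_⟩
      · intro hz
        simp [pvKeep, hz.1, hz.2.1, hz.2.2] at hk
      · obtain ⟨h, k, l⟩ := x
        exact pvNormVal_fixed h k l hk
  have hpermS : S.Perm (generate_crystal_directions_alt hmax) :=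
    (List.perm_ext_iff_of_nodup hSnodup hAltNodup).mpr hmem
  have hperm : (S.foldl (fun acc x => PySem.List.insertBy pvLexLt x acc) []).Perm
      (generate_crystal_directions_alt hmax) :=
    (pvFoldSort_perm S []).trans (by simpa using hpermS)
  exact List.Perm.eq_of_pairwise (le := fun a b => pvLexLt b a = false)
    (fun a b _ _ h1 h2 => pvLex_le_antisymm a b (by exact h1) (by exact h2))
    (pvFoldSort_pairwise S [] (by simp))
    ((pvAlt_pairwise hmax).imp (fun hab => pvLex_asymm _ _ hab))
    hperm
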